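-- pv_equiv track=rewrite | github.com/sc420/funghi-den-adventure | funghi-den-adventure/calc.py | convert_combinations_to_allocations
-- ===== SOURCE A (Python) =====
-- def convert_combinations_to_allocations(data, funghi_combinations):
--     allocations = []
--     adventures = data['adventures']
--     for combination in funghi_combinations:
--         allocation = {}
--         ofs_start = 0
--         for adventure_id, adventure in adventures.items():
--             capacity = adventure['capacity']
--             ofs_end = ofs_start + capacity
--             allocation[adventure_id] = combination[ofs_start:ofs_end]
--             ofs_start = ofs_end
--         allocations.append(allocation)
--     return allocations
-- ===== SOURCE B (Python) =====
-- def convert_combinations_to_allocations(data, funghi_combinations):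
--     adventures = data['adventures']
--     # Loop interchange: adventures on the OUTER loop, combinations inner.
--     # Each adventure appends its (id, slice) pair to every combination's row,
--     # and the rows are turned into dicts only at the end.
--     rows = [[] for _ in funghi_combinations]
--     start = 0
--     for adventure_id, adventure in adventures.items():
--         end = start + adventure['capacity']
--         for row, combination in zip(rows, funghi_combinations):
--             row.append((adventure_id, combination[start:end]))
--         start = end
--     return [dict(row) for row in rows]
-- ===== Notes on version B (the rewrite author's own statement) =====
-- stated objective: alternative
-- what changed: B interchanges the loops: it iterates adventures on the outside, appending each adventure's (id, slice) pair to every combination's row in one inner sweep, and only at the end converts each accumulated row of pairs into a dict, instead of A's per-combination loop that rebuilds a dict and the running offset for each combination.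
import Mathlib
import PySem

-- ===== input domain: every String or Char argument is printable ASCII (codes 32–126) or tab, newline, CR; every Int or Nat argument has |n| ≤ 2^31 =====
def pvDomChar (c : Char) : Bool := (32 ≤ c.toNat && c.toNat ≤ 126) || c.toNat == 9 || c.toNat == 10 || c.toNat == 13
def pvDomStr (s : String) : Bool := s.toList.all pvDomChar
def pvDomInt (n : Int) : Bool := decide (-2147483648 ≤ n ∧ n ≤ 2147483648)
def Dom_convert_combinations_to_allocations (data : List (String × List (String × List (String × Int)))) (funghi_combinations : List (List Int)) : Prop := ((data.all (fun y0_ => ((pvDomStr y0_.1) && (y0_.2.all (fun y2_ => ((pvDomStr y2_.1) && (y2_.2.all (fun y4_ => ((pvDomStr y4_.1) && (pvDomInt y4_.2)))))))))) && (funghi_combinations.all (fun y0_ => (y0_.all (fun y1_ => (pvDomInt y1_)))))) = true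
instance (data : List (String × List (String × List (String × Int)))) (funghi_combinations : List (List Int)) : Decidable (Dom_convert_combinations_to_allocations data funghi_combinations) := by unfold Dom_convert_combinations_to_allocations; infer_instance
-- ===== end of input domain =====

-- B interchanges the loops: adventures outer, combinations inner — each adventure appends its
-- (id, slice) pair to every combination's row, and rows become dicts only at the end; objective: alternative.


-- first-match association-list lookup (d[k] for the dict-typed inputs)
def pvLookup {α : Type} (d : List (String × α)) (k : String) : Option α :=
  (d.find? (fun p => p.1 == k)).map (·.2)

-- ===== PORT A =====
def convert_combinations_to_allocations (data : List (String × List (String × List (String × Int)))) (funghi_combinations : List (List Int)) : List (List (String × List Int)) :=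
  let adventures := (pvLookup data "adventures").getD []   -- data['adventures']; Pre_ guarantees the lookup succeeds
  (funghi_combinations.foldl (fun (allocations : List (List (String × List Int))) combination =>
    let st := adventures.foldl
      (fun (st : PySem.Dict String (List Int) × Int) p =>
        let capacity := (pvLookup p.2 "capacity").getD 0   -- adventure['capacity']; Pre_ guarantees presence
        let ofs_end := st.2 + capacity
        (st.1.insert p.1 (PySem.List.slice combination (some st.2) (some ofs_end)), ofs_end))
      (PySem.Dict.empty, 0)
    allocations ++ [st.1.items]) [])

-- ===== PORT B =====
def convert_combinations_to_allocations_alt (data : List (String × List (String × List (String × Int)))) (funghi_combinations : List (List Int)) : List (List (String × List Int)) :=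
  let adventures := (pvLookup data "adventures").getD []
  let rows0 : List (List (String × List Int)) := funghi_combinations.map (fun _ => [])
  -- outer loop over adventures; the inner 'for row, combination in zip(rows, funghi_combinations)'
  -- with row.append(...) is the zip-then-map over the row/combination pairs
  let rows := (adventures.foldl
    (fun (st : List (List (String × List Int)) × Int) p =>
      let e := st.2 + (pvLookup p.2 "capacity").getD 0
      ((st.1.zip funghi_combinations).map
        (fun q => q.1 ++ [(p.1, PySem.List.slice q.2 (some st.2) (some e))]), e))
    (rows0, 0)).1
  rows.map (fun row =>
    (row.foldl (fun (d : PySem.Dict String (List Int)) t => d.insert t.1 t.2) PySem.Dict.empty).items)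

-- ===== PRECONDITION & SPEC =====
-- Pre_ excludes exactly the inputs on which Python A raises KeyError: data lacking the
-- 'adventures' key, or some adventure lacking the 'capacity' key.
def Pre_convert_combinations_to_allocations (data : List (String × List (String × List (String × Int)))) (funghi_combinations : List (List Int)) : Prop :=
  ∃ advs, pvLookup data "adventures" = some advs ∧
    ∀ p ∈ advs, (pvLookup p.2 "capacity").isSome
instance (data : List (String × List (String × List (String × Int)))) (funghi_combinations : List (List Int)) : Decidable (Pre_convert_combinations_to_allocations data funghi_combinations) := by unfold Pre_convert_combinations_to_allocations; infer_instance

def pvWitness_convert_combinations_to_allocations : (List (String × List (String × List (String × Int)))) × List (List Int) :=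
  ([("adventures", [("a", [("capacity", 2)]), ("b", [("capacity", 1)])])], [[1, 2, 3], [4, 5]])

def Spec_convert_combinations_to_allocations (data : List (String × List (String × List (String × Int)))) (funghi_combinations : List (List Int)) (out : List (List (String × List Int))) : Prop := out = convert_combinations_to_allocations_alt data funghi_combinations
instance (data : List (String × List (String × List (String × Int)))) (funghi_combinations : List (List Int)) (out : List (List (String × List Int))) : Decidable (Spec_convert_combinations_to_allocations data funghi_combinations out) := by unfold Spec_convert_combinations_to_allocations; infer_instance

-- ===== CLAIM (what is proved, stated in full; the proofs are below) =====
def Claim_equal_convert_combinations_to_allocations : Prop := ∀ (data : List (String × List (String × List (String × Int)))) (funghi_combinations : List (List Int)), Dom_convert_combinations_to_allocations data funghi_combinations → Pre_convert_combinations_to_allocations data funghi_combinations → Spec_convert_combinations_to_allocations data funghi_combinations (convert_combinations_to_allocations data funghi_combinations)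

-- ===== LEMMAS AND PROOFS =====

-- capacity of one adventure entry
def pvCap (p : String × List (String × Int)) : Int := (pvLookup p.2 "capacity").getD 0

-- the (id, slice) pair list one combination receives, starting at offset s
def pvPairs : List (String × List (String × Int)) → Int → List Int → List (String × List Int)
  | [], _, _ => []
  | p :: rest, s, c =>
    (p.1, PySem.List.slice c (some s) (some (s + pvCap p))) :: pvPairs rest (s + pvCap p) c

-- A's inner fold builds the dict by inserting exactly the pvPairs pairs
theorem pvInnerA (advs : List (String × List (String × Int))) (c : List Int)
    (d : PySem.Dict String (List Int)) (s : Int) :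
    (advs.foldl
      (fun (st : PySem.Dict String (List Int) × Int) p =>
        ((st.1.insert p.1 (PySem.List.slice c (some st.2) (some (st.2 + (pvLookup p.2 "capacity").getD 0)))), st.2 + (pvLookup p.2 "capacity").getD 0))
      (d, s)).1
    = (pvPairs advs s c).foldl
        (fun (d : PySem.Dict String (List Int)) t => d.insert t.1 t.2) d := by
  induction advs generalizing d s with
  | nil => rfl
  | cons p rest ih =>
    simp only [List.foldl_cons, pvPairs, pvCap]
    exact ih _ _

-- zipping rows (a map over the combinations) back with the combinations pairs each row with its combination
theorem pvZipMap {α β : Type} (g : α → β) (l : List α) :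
    (l.map g).zip l = l.map (fun c => (g c, c)) := by
  induction l with
  | nil => rfl
  | cons a t iht => simp [iht]

-- B's outer fold, started from rows combs.map g, yields each row extended with its pvPairs
theorem pvRowsB (advs : List (String × List (String × Int))) (combs : List (List Int))
    (g : List Int → List (String × List Int)) (s : Int) :
    ((advs.foldl
      (fun (st : List (List (String × List Int)) × Int) p =>
        ((st.1.zip combs).map
          (fun q => q.1 ++ [(p.1, PySem.List.slice q.2 (some st.2) (some (st.2 + (pvLookup p.2 "capacity").getD 0)))]),
         st.2 + (pvLookup p.2 "capacity").getD 0))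
      (combs.map g, s)).1)
    = combs.map (fun c => g c ++ pvPairs advs s c) := by
  induction advs generalizing g s with
  | nil => simp [pvPairs]
  | cons p rest ih =>
    simp only [List.foldl_cons]
    rw [pvZipMap, List.map_map]
    simp only [Function.comp_def]
    rw [ih]
    apply List.map_congr_left
    intro c _
    simp [pvPairs, pvCap, List.append_assoc]

-- ===== VERDICT (by name: the statement is the Claim_ definition above) =====
theorem convert_combinations_to_allocations_spec : Claim_equal_convert_combinations_to_allocations := by
  intro data fcs _ _
  show _ = _
  unfold convert_combinations_to_allocations convert_combinations_to_allocations_alt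
  simp only []
  set advs := (pvLookup data "adventures").getD [] with hadvs
  rw [PySem.List.foldl_append_singleton_eq_map]
  have hb := pvRowsB advs fcs (fun _ => []) 0
  rw [hb]
  rw [List.map_map]
  apply List.map_congr_left
  intro c _
  simp only [Function.comp, List.nil_append]
  rw [pvInnerA advs c PySem.Dict.empty 0]
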